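-- pv_equiv track=rewrite | github.com/yubocai-poly/-Design-and-Analysis-of-Algorithms | Week2/Tutorial_2/mult.py | cost_poly_tc3_mult
-- ===== SOURCE A (Python) =====
-- def cost_poly_tc3_mult(n):
--     if n == 1:
--         return 1
--     if n == 2:
--         return 3
--     if n % 3 == 0:
--         return 5 * cost_poly_tc3_mult(n // 3) + 30 * n
--     if n % 3 == 1:
--         return 5 * cost_poly_tc3_mult((n + 2) // 3) + 30 * n
--     if n % 3 == 2:
--         return 5 * cost_poly_tc3_mult((n + 1) // 3) + 30 * n
-- ===== SOURCE B (Python) =====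
-- def cost_poly_tc3_mult(n):
--     # Iterative: T(n) = 30n + 5*T(ceil(n/3)), T(1)=1, T(2)=3
--     result = 0
--     coeff = 1
--     while n > 2:
--         result += coeff * 30 * n
--         coeff *= 5
--         n = (n + 2) // 3
--     return result + coeff * (1 if n == 1 else 3)
-- ===== Notes on version B (the rewrite author's own statement) =====
-- stated objective: simpler
-- what changed: Replaces the three-branch recursion by a single iterative loop accumulating coeff*30*n with coeff*=5, using one ceiling division (n+2)//3 that covers all three residue branches.
import Mathlib
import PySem

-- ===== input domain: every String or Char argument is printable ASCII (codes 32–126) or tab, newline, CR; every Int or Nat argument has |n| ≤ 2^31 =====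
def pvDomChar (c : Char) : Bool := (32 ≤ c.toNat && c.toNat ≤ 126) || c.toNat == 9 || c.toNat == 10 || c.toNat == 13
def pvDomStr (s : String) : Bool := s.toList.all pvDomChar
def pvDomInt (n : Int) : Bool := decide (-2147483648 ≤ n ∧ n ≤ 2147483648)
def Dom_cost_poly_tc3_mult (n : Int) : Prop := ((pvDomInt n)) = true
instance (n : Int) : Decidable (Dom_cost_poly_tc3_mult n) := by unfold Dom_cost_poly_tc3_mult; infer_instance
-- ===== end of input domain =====

-- B replaces A's three-branch recursion by one iterative loop with a single
-- ceiling division; objective: simpler. Equivalence is claimed on n ≥ 1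
-- (A's Python raises RecursionError on n ≤ 0).

-- ===== PORT A =====
-- Literal transliteration of A's recursion; the fuel argument only makes the
-- (on n ≤ 0 non-terminating) Python recursion total in Lean and is ample on Pre_.
def costAFuel : Nat → Int → Int
  | 0, _ => 0
  | fuel+1, n =>
    if n == 1 then 1
    else if n == 2 then 3
    else if PySem.Int.mod n 3 == 0 then 5 * costAFuel fuel (PySem.Int.floordiv n 3) + 30 * n
    else if PySem.Int.mod n 3 == 1 then 5 * costAFuel fuel (PySem.Int.floordiv (n + 2) 3) + 30 * n
    else if PySem.Int.mod n 3 == 2 then 5 * costAFuel fuel (PySem.Int.floordiv (n + 1) 3) + 30 * n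
    else 0

def cost_poly_tc3_mult (n : Int) : Int := costAFuel (n.toNat + 1) n

-- ===== PORT B =====
def altLoop (n result coeff : Int) : Int :=
  if h : n > 2 then
    altLoop (PySem.Int.floordiv (n + 2) 3) (result + coeff * 30 * n) (coeff * 5)
  else
    result + coeff * (if n == 1 then 1 else 3)
termination_by n.toNat
decreasing_by
  have := PySem.Int.floordiv_eq_ediv_of_pos (a := n + 2) (b := 3) (by omega)
  omega

def cost_poly_tc3_mult_alt (n : Int) : Int := altLoop n 0 1

-- ===== PRECONDITION & SPEC =====
-- A's Python recursion never reaches a base case for n ≤ 0 (RecursionError).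
def Pre_cost_poly_tc3_mult (n : Int) : Prop := 1 ≤ n
instance (n : Int) : Decidable (Pre_cost_poly_tc3_mult n) := by unfold Pre_cost_poly_tc3_mult; infer_instance
def pvWitness_cost_poly_tc3_mult : Int := 10

def Spec_cost_poly_tc3_mult (n : Int) (out : Int) : Prop := out = cost_poly_tc3_mult_alt n
instance (n : Int) (out : Int) : Decidable (Spec_cost_poly_tc3_mult n out) := by unfold Spec_cost_poly_tc3_mult; infer_instance

-- ===== CLAIM (what is proved, stated in full; the proofs are below) =====
def Claim_equal_cost_poly_tc3_mult : Prop := ∀ (n : Int), Dom_cost_poly_tc3_mult n → Pre_cost_poly_tc3_mult n → Spec_cost_poly_tc3_mult n (cost_poly_tc3_mult n)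

-- ===== LEMMAS AND PROOFS =====

-- For n ≥ 3, every branch of A's recursion steps to the same ceiling division (n+2)//3.
lemma costAFuel_step (fuel : Nat) (n : Int) (h3 : 3 ≤ n) :
    costAFuel (fuel + 1) n = 5 * costAFuel fuel (PySem.Int.floordiv (n + 2) 3) + 30 * n := by
  have hm : PySem.Int.mod n 3 = n % 3 := PySem.Int.mod_eq_emod_of_pos (by omega)
  have hd : PySem.Int.floordiv n 3 = n / 3 := PySem.Int.floordiv_eq_ediv_of_pos (by omega)
  have hd1 : PySem.Int.floordiv (n + 1) 3 = (n + 1) / 3 := PySem.Int.floordiv_eq_ediv_of_pos (by omega)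
  have hd2 : PySem.Int.floordiv (n + 2) 3 = (n + 2) / 3 := PySem.Int.floordiv_eq_ediv_of_pos (by omega)
  simp only [costAFuel, hm, hd, hd1, hd2, beq_iff_eq]
  have h1 : n ≠ 1 := by omega
  have h2 : n ≠ 2 := by omega
  by_cases h0 : n % 3 = 0
  · have : n / 3 = (n + 2) / 3 := by omega
    simp [h1, h2, h0, this]
  · by_cases hone : n % 3 = 1
    · simp [h1, h2, hone]
    · have htwo : n % 3 = 2 := by omega
      have : (n + 1) / 3 = (n + 2) / 3 := by omega
      simp [h1, h2, htwo, this]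

-- Loop invariant: altLoop n r c = r + c * T(n), where T is A's recursion with ample fuel.
lemma altLoop_eq (fuel : Nat) : ∀ (n : Int), 1 ≤ n → n.toNat ≤ fuel →
    ∀ (r c : Int), altLoop n r c = r + c * costAFuel fuel n := by
  induction fuel with
  | zero => intro n h1 h2; omega
  | succ f ih =>
    intro n h1 h2 r c
    by_cases h3 : 3 ≤ n
    · have hd2 : PySem.Int.floordiv (n + 2) 3 = (n + 2) / 3 := PySem.Int.floordiv_eq_ediv_of_pos (by omega)
      rw [altLoop]
      simp only [show n > 2 from by omega, dite_true]
      rw [ih (PySem.Int.floordiv (n + 2) 3) (by rw [hd2]; omega) (by rw [hd2]; omega),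
          costAFuel_step f n h3]
      ring
    · rw [altLoop]
      simp only [show ¬ (n > 2) from by omega, dite_false]
      interval_cases n <;> simp [costAFuel]

-- ===== VERDICT (by name: the statement is the Claim_ definition above) =====
theorem cost_poly_tc3_mult_spec : Claim_equal_cost_poly_tc3_mult := by
  intro n _ hpre
  show cost_poly_tc3_mult n = cost_poly_tc3_mult_alt n
  rw [cost_poly_tc3_mult, cost_poly_tc3_mult_alt,
      altLoop_eq (n.toNat + 1) n hpre (by omega) 0 1]
  ring
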